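-- pv_equiv track=rewrite | github.com/stonecodecs/algostudy | ch3/challenges/3.3_indexmatch.py | _hasMatchingIndex
-- ===== SOURCE A (Python) =====
-- def _hasMatchingIndex(a, start, end):
--     N = (end - start)
--     mid = start + (end - start) // 2
--     if N <= 1: return mid == a[mid]
--     if a[mid] < mid: # go right
--         return _hasMatchingIndex(a, mid+1, end)
--     elif a[mid] > mid: # go left
--         return _hasMatchingIndex(a, start, mid)
--     else: return mid == a[mid]
-- ===== SOURCE B (Python) =====
-- def _hasMatchingIndex(a, start, end):
--     # Iterative binary-search descent: same midpoints and comparisons as the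
--     # recursive version, with an explicit start/end loop instead of recursion.
--     while end - start > 1:
--         mid = start + (end - start) // 2
--         v = a[mid]
--         if v < mid:
--             start = mid + 1
--         elif v > mid:
--             end = mid
--         else:
--             return True
--     mid = start + (end - start) // 2
--     return a[mid] == mid
-- ===== Notes on version B (the rewrite author's own statement) =====
-- stated objective: simpler
-- what changed: Replaced the recursive binary-search descent by an iterative while loop over mutable start/end bounds (same midpoints, equal-case returns True directly).
-- outside the precondition, e.g. on _hasMatchingIndex([-1, 5, 0], 0, 3): A returns False, B returns False; on _hasMatchingIndex([-9, 1], -3, -1): A returns False, B returns False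
import Mathlib
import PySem

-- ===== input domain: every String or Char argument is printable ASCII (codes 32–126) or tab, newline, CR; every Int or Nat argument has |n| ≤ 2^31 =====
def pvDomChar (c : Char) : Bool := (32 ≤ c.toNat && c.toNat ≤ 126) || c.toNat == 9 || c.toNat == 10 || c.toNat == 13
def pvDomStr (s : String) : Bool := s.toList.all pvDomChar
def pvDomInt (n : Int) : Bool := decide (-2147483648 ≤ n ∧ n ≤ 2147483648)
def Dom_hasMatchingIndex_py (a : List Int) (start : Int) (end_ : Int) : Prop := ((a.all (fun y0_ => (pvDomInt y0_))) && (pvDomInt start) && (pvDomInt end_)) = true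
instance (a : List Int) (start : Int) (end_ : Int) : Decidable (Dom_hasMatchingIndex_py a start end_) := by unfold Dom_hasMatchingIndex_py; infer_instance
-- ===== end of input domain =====

-- B replaces the recursive binary-search descent by an iterative start/end loop (simpler); same midpoints, same results.

-- ===== PORT A =====
-- Literal port of the recursive _hasMatchingIndex; a[mid] via pyGet? (none = IndexError, excluded by Pre_; the port returns false there).
def hasMatchingIndex_py (a : List Int) (start : Int) (end_ : Int) : Bool :=
  let N := end_ - start
  let mid := start + PySem.Int.floordiv (end_ - start) 2
  if N ≤ 1 then
    match PySem.List.pyGet? a mid with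
    | some v => decide (mid = v)
    | none => false
  else
    match PySem.List.pyGet? a mid with
    | none => false
    | some v =>
      if v < mid then hasMatchingIndex_py a (mid + 1) end_
      else if v > mid then hasMatchingIndex_py a start mid
      else decide (mid = v)
termination_by (end_ - start).toNat
decreasing_by
  all_goals
    simp only [PySem.Int.floordiv_eq_ediv_of_pos (by omega : (0:Int) < 2)] at *
    omega

-- ===== PORT B =====
-- The while loop of Source B as a tail-recursive state machine on (start, end_).
def hmiLoop (a : List Int) (start : Int) (end_ : Int) : Bool :=
  if 1 < end_ - start then
    let mid := start + PySem.Int.floordiv (end_ - start) 2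
    match PySem.List.pyGet? a mid with
    | none => false          -- Python raises IndexError here; excluded by Pre_
    | some v =>
      if v < mid then hmiLoop a (mid + 1) end_
      else if mid < v then hmiLoop a start mid
      else true
  else
    let mid := start + PySem.Int.floordiv (end_ - start) 2
    match PySem.List.pyGet? a mid with
    | some v => decide (v = mid)
    | none => false
termination_by (end_ - start).toNat
decreasing_by
  all_goals
    simp only [PySem.Int.floordiv_eq_ediv_of_pos (by omega : (0:Int) < 2)] at *
    omega

def hasMatchingIndex_py_alt (a : List Int) (start : Int) (end_ : Int) : Bool :=
  hmiLoop a start end_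

-- ===== PRECONDITION & SPEC =====
-- Pre_ excludes exactly the calls that may run into IndexError: it admits all immediate base
-- cases with an in-range midpoint, and the well-bracketed calls -len ≤ start ≤ end_ ≤ len
-- (requiring, when end_ = len, that the last element a[-1] ≥ len-1 so the descent cannot step
-- to index len); whether an arbitrary ill-bracketed call avoids an out-of-range index is
-- data-dependent and has no closed form, so some excluded inputs do return in A (see cites).
def Pre_hasMatchingIndex_py (a : List Int) (start : Int) (end_ : Int) : Prop :=
  (end_ - start ≤ 1 ∧ -(a.length : Int) ≤ start + PySem.Int.floordiv (end_ - start) 2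
      ∧ start + PySem.Int.floordiv (end_ - start) 2 < a.length)
  ∨ (-(a.length : Int) ≤ start ∧ start ≤ end_ ∧ end_ < a.length)
  ∨ (-(a.length : Int) ≤ start ∧ start < end_ ∧ end_ = a.length
      ∧ ((PySem.List.pyGet? a ((a.length : Int) - 1)).any fun v => decide ((a.length : Int) - 1 ≤ v)) = true)
instance (a : List Int) (start : Int) (end_ : Int) : Decidable (Pre_hasMatchingIndex_py a start end_) := by unfold Pre_hasMatchingIndex_py; infer_instance

def pvWitness_hasMatchingIndex_py : List Int × Int × Int := ([0], 0, 0)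

def Spec_hasMatchingIndex_py (a : List Int) (start : Int) (end_ : Int) (out : Bool) : Prop := out = hasMatchingIndex_py_alt a start end_
instance (a : List Int) (start : Int) (end_ : Int) (out : Bool) : Decidable (Spec_hasMatchingIndex_py a start end_ out) := by unfold Spec_hasMatchingIndex_py; infer_instance

-- ===== CLAIM (what is proved, stated in full; the proofs are below) =====
def Claim_equal_hasMatchingIndex_py : Prop := ∀ (a : List Int) (start : Int) (end_ : Int), Dom_hasMatchingIndex_py a start end_ → Pre_hasMatchingIndex_py a start end_ → Spec_hasMatchingIndex_py a start end_ (hasMatchingIndex_py a start end_)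

-- ===== LEMMAS AND PROOFS =====

-- The two ports agree on every input (the none-branches also coincide), so Pre_ is not needed here.
theorem hmi_eq_aux (a : List Int) : ∀ (n : Nat) (s e : Int), (e - s).toNat ≤ n →
    hasMatchingIndex_py a s e = hmiLoop a s e := by
  intro n
  induction n with
  | zero =>
    intro s e h
    rw [hasMatchingIndex_py, hmiLoop]
    simp only [if_pos (show e - s ≤ 1 by omega), if_neg (show ¬ 1 < e - s by omega)]
    cases PySem.List.pyGet? a (s + PySem.Int.floordiv (e - s) 2) <;> simp [eq_comm]
  | succ n ih =>
    intro s e h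
    rw [hasMatchingIndex_py, hmiLoop]
    by_cases hN : e - s ≤ 1
    · simp only [if_pos hN, if_neg (show ¬ 1 < e - s by omega)]
      cases PySem.List.pyGet? a (s + PySem.Int.floordiv (e - s) 2) <;> simp [eq_comm]
    · simp only [if_neg hN, if_pos (show 1 < e - s by omega)]
      have hfd : PySem.Int.floordiv (e - s) 2 = (e - s) / 2 :=
        PySem.Int.floordiv_eq_ediv_of_pos (by omega)
      cases hg : PySem.List.pyGet? a (s + PySem.Int.floordiv (e - s) 2) with
      | none => rfl
      | some v =>
        by_cases h1 : v < s + PySem.Int.floordiv (e - s) 2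
        · simp only [if_pos h1]
          exact ih _ _ (by rw [hfd] at *; omega)
        · simp only [if_neg h1]
          by_cases h2 : v > s + PySem.Int.floordiv (e - s) 2
          · simp only [if_pos h2]
            exact ih _ _ (by rw [hfd] at *; omega)
          · simp only [if_neg h2]
            simp only [decide_eq_true_eq]
            rw [hfd] at h1 h2 ⊢
            omega

theorem hmi_eq (a : List Int) (start end_ : Int) :
    hasMatchingIndex_py a start end_ = hmiLoop a start end_ :=
  hmi_eq_aux a (end_ - start).toNat start end_ (le_refl _)

-- ===== VERDICT (by name: the statement is the Claim_ definition above) =====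
theorem hasMatchingIndex_py_spec : Claim_equal_hasMatchingIndex_py := by
  intro a start end_ _ _
  unfold Spec_hasMatchingIndex_py hasMatchingIndex_py_alt
  exact hmi_eq a start end_
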